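-- pv_equiv track=rewrite | github.com/chingyen06/Data-Structure | 02/6.py | chebyshev_iterative
-- ===== SOURCE A (Python) =====
-- def chebyshev_iterative(x):
--     prev_n2 = [1]
--     prev_n1 = [1, 0]
--
--     memo = [prev_n2, prev_n1]
--
--     if (x <= 1):
--         return memo[x]
--     else:
--         for i in range(2, x + 1):
--             temp1 = memo[i-1]
--             temp2 = memo[i-2]
--             result = list()
--             for j in range(len(temp1)):
--                 result.append(temp1[j] * 2)
--             result.append(0)
--             offset = len(result) - len(temp2)
--             for j in range(0, len(temp2)):
--                 result[j+offset] -= temp2[j]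
--             memo.append(result)
--         return memo[x]
-- ===== SOURCE B (Python) =====
-- def chebyshev_iterative(x):
--     if x == 0:
--         return [1]
--     # rolling pair of compact coefficient rows (only the ~n/2 non-zero
--     # coefficients of T_n, in descending powers); expand zeros at the end
--     p2, p1 = [1], [1]
--     for _ in range(2, x + 1):
--         q = p1 + [0] * (len(p2) + 1 - len(p1))
--         r = [2 * q[0]] + [2 * a - b for a, b in zip(q[1:], p2)]
--         p2, p1 = p1, r
--     out = [0] * (x + 1)
--     for k in range(len(p1)):
--         out[2 * k] = p1[k]
--     return out
-- ===== Notes on version B (the rewrite author's own statement) =====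
-- stated objective: alternative
-- what changed: B keeps only a rolling pair of COMPACT coefficient rows (the ~n/2 non-zero coefficients of T_n, combining the doubling and the subtraction into one zip pass) instead of A's full memo table of all n rows with interleaved zeros, and re-inserts the zeros once at the end.
-- outside the precondition, e.g. on chebyshev_iterative(-1): A returns [1, 0], B raises IndexError; on chebyshev_iterative(-2): A returns [1], B raises IndexError; on chebyshev_iterative(-3): A raises IndexError, B raises IndexError
import Mathlib
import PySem

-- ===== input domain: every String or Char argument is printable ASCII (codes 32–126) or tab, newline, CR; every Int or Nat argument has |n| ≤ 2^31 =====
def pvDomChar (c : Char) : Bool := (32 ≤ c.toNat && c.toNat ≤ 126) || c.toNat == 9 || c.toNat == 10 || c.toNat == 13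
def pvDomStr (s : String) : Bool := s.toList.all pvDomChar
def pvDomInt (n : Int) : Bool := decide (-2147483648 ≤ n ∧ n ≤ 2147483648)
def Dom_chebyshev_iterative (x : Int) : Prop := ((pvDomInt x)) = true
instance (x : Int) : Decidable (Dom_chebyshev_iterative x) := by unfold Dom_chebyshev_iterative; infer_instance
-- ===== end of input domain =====

-- B replaces A's full memo table of zero-padded rows by a rolling pair of compact
-- (zero-free) rows and re-inserts the zeros once at the end; equivalence on 0 ≤ x.

-- ===== PORT A =====
-- body of one iteration of A's outer loop, given temp1 = memo[i-1], temp2 = memo[i-2]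
def chebFull (t1 t2 : List Int) : List Int :=
  let result := (PySem.List.pyRange 0 (t1.length : Int) 1).foldl
      (fun acc j => acc ++ [PySem.List.pyGetD t1 j 0 * 2]) []
  let result := result ++ [0]
  let offset : Int := (result.length : Int) - (t2.length : Int)
  (PySem.List.pyRange 0 (t2.length : Int) 1).foldl
      (fun acc j =>
        PySem.List.pySetD acc (j + offset)
          (PySem.List.pyGetD acc (j + offset) 0 - PySem.List.pyGetD t2 j 0)) result

def chebyshev_iterative (x : Int) : List Int :=
  let memo : List (List Int) := [[1], [1, 0]]
  if x ≤ 1 then (PySem.List.pyGet? memo x).getD []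
  else
    let memo := (PySem.List.pyRange 2 (x + 1) 1).foldl
      (fun memo i =>
        memo ++ [chebFull ((PySem.List.pyGet? memo (i - 1)).getD [])
                          ((PySem.List.pyGet? memo (i - 2)).getD [])]) memo
    (PySem.List.pyGet? memo x).getD []

-- ===== PORT B =====
-- one iteration of B's loop on the compact rows: q = p1 + [0]*(len(p2)+1-len(p1));
-- r = [2*q[0]] + [2*a - b for a, b in zip(q[1:], p2)]
def chebCompact (p1 p2 : List Int) : List Int :=
  let q := p1 ++ List.replicate (p2.length + 1 - p1.length) 0
  [2 * PySem.List.pyGetD q 0 0] ++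
    ((PySem.List.slice q (some 1) none).zip p2).map (fun ab => 2 * ab.1 - ab.2)

def chebyshev_iterative_alt (x : Int) : List Int :=
  if x = 0 then [1]
  else
    let s := (PySem.List.pyRange 2 (x + 1) 1).foldl
      (fun (s : List Int × List Int) _ => (s.2, chebCompact s.2 s.1)) ([1], [1])
    let p1 := s.2
    let out : List Int := List.replicate (x + 1).toNat 0   -- [0]*(x+1); empty when x+1 ≤ 0, like Python
    (PySem.List.pyRange 0 (p1.length : Int) 1).foldl
      (fun o k => PySem.List.pySetD o (2 * k) (PySem.List.pyGetD p1 k 0)) out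

-- ===== PRECONDITION & SPEC =====
-- Pre_ excludes negative x (outside the natural domain): A raises IndexError for
-- x ≤ -3 and returns accidental negative-index wraparound values at x = -1, -2,
-- where B raises IndexError.
def Pre_chebyshev_iterative (x : Int) : Prop := 0 ≤ x
instance (x : Int) : Decidable (Pre_chebyshev_iterative x) := by
  unfold Pre_chebyshev_iterative; infer_instance

def pvWitness_chebyshev_iterative : Int := 5

def Spec_chebyshev_iterative (x : Int) (out : List Int) : Prop := out = chebyshev_iterative_alt x
instance (x : Int) (out : List Int) : Decidable (Spec_chebyshev_iterative x out) := by
  unfold Spec_chebyshev_iterative; infer_instance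

-- ===== CLAIM (what is proved, stated in full; the proofs are below) =====
def Claim_equal_chebyshev_iterative : Prop :=
  ∀ (x : Int), Dom_chebyshev_iterative x → Pre_chebyshev_iterative x →
    Spec_chebyshev_iterative x (chebyshev_iterative x)

-- ===== LEMMAS AND PROOFS =====

theorem getD_append_replicate_zero (l : List Int) (p k : Nat) :
    (l ++ List.replicate p 0).getD k 0 = l.getD k 0 := by
  by_cases hk : k < l.length
  · exact List.getD_append _ _ _ _ hk
  · rw [List.getD_eq_getElem?_getD, List.getElem?_append_right (by omega),
      List.getD_eq_default _ _ (by omega)]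
    simp [List.getElem?_replicate]
    split_ifs <;> rfl

theorem chebCompact_len (p1 p2 : List Int) (h : p1.length ≤ p2.length + 1) :
    (chebCompact p1 p2).length = p2.length + 1 := by
  unfold chebCompact
  simp [PySem.List.slice_from_one, List.length_zip]
  omega

def crow : Nat → List Int
  | 0 => [1]
  | 1 => [1]
  | n + 2 => chebCompact (crow (n + 1)) (crow n)

theorem len_crow : ∀ n, (crow n).length = n / 2 + 1 := by
  intro n
  induction n using Nat.strong_induction_on with
  | _ n ih =>
    match n with
    | 0 => rfl
    | 1 => rfl
    | n + 2 =>
      show (chebCompact (crow (n+1)) (crow n)).length = _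
      rw [chebCompact_len _ _ (by rw [ih (n+1) (by omega), ih n (by omega)]; omega),
        ih n (by omega)]
      omega

theorem crow_ne_nil (n : Nat) : crow n ≠ [] := by
  have := len_crow n; intro h; rw [h] at this; simp at this

theorem chebCompact_getD (p1 p2 : List Int) (_hne : p1 ≠ []) (h : p1.length ≤ p2.length + 1)
    (k : Nat) :
    (chebCompact p1 p2).getD k 0 =
      2 * p1.getD k 0 - (if 1 ≤ k ∧ k ≤ p2.length then p2.getD (k - 1) 0 else 0) := by
  simp only [chebCompact]
  rw [PySem.List.slice_from_one]
  set q := p1 ++ List.replicate (p2.length + 1 - p1.length) 0 with hq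
  have hqlen : q.length = p2.length + 1 := by rw [hq]; simp; omega
  have hqget : ∀ m, q.getD m 0 = p1.getD m 0 := fun m => getD_append_replicate_zero _ _ _
  have htlen : q.tail.length = p2.length := by rw [List.length_tail, hqlen]; omega
  match k with
  | 0 =>
    simp only [PySem.List.pyGetD_zero, List.singleton_append]
    rw [List.getD_cons_zero, hqget 0]
    simp
  | k + 1 =>
    rw [List.singleton_append, List.getD_cons_succ]
    by_cases hk : k < p2.length
    · rw [List.getD_eq_getElem _ _ (by rw [List.length_map, List.length_zip]; omega)]
      rw [List.getElem_map, List.getElem_zip]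
      have : q.tail[k]'(by omega) = q[k+1]'(by omega) := List.getElem_tail _
      rw [this, ← List.getD_eq_getElem q 0 (by omega), hqget (k+1),
        if_pos ⟨by omega, by omega⟩, ← List.getD_eq_getElem p2 0 hk]
      simp
    · rw [List.getD_eq_default _ _ (by rw [List.length_map, List.length_zip]; omega),
        if_neg (by omega), List.getD_eq_default p1 _ (by omega)]
      simp


theorem subFold_len (t2 : List Int) (off : Nat) : ∀ (m : Nat) (r : List Int),
    ((PySem.List.pyRange 0 (m : Int) 1).foldl
      (fun acc j => PySem.List.pySetD acc (j + (off : Int))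
        (PySem.List.pyGetD acc (j + (off : Int)) 0 - PySem.List.pyGetD t2 j 0)) r).length = r.length := by
  intro m
  induction m with
  | zero => intro r; simp
  | succ m ih =>
    intro r
    rw [show ((m + 1 : Nat) : Int) = (m : Int) + 1 by push_cast; ring,
      PySem.List.pyRange_one_succ_right (by exact_mod_cast Nat.zero_le m), List.foldl_append]
    simp only [List.foldl_cons, List.foldl_nil]
    rw [show (m : Int) + (off : Int) = ((m + off : Nat) : Int) by push_cast; ring,
      PySem.List.pySetD_natCast, List.length_set, ih r]

theorem subFold_getD (t2 : List Int) (off : Nat) : ∀ (m : Nat) (r : List Int),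
    m ≤ t2.length → off + t2.length = r.length → ∀ i : Nat,
    ((PySem.List.pyRange 0 (m : Int) 1).foldl
      (fun acc j => PySem.List.pySetD acc (j + (off : Int))
        (PySem.List.pyGetD acc (j + (off : Int)) 0 - PySem.List.pyGetD t2 j 0)) r).getD i 0
    = r.getD i 0 - (if off ≤ i ∧ i < off + m then t2.getD (i - off) 0 else 0) := by
  intro m
  induction m with
  | zero =>
    intro r hm hr i
    simp only [Int.natCast_zero, PySem.List.pyRange_zero, Int.toNat_zero, List.range_zero,
      List.map_nil, List.foldl_nil]
    rw [if_neg (by omega)]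
    ring
  | succ m ih =>
    intro r hm hr i
    rw [show ((m + 1 : Nat) : Int) = (m : Int) + 1 by push_cast; ring,
      PySem.List.pyRange_one_succ_right (by exact_mod_cast Nat.zero_le m), List.foldl_append]
    simp only [List.foldl_cons, List.foldl_nil]
    rw [show (m : Int) + (off : Int) = ((m + off : Nat) : Int) by push_cast; ring,
      PySem.List.pySetD_natCast, PySem.List.pyGetD_natCast, PySem.List.pyGetD_natCast]
    have hlen := subFold_len t2 off m r
    have hmoff : m + off < r.length := by omega
    set F := (PySem.List.pyRange 0 (m : Int) 1).foldl
      (fun acc j => PySem.List.pySetD acc (j + (off : Int))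
        (PySem.List.pyGetD acc (j + (off : Int)) 0 - PySem.List.pyGetD t2 j 0)) r with hF
    have hFset : ∀ i : Nat, F.getD i 0 = r.getD i 0 - (if off ≤ i ∧ i < off + m then t2.getD (i - off) 0 else 0) :=
      ih r (by omega) hr
    rw [List.getD_eq_getElem?_getD, List.getElem?_set]
    by_cases hi : i = m + off
    · subst hi
      rw [if_pos rfl, if_pos (show m + off < F.length by omega), Option.getD_some,
        hFset (m + off), if_neg (by omega), if_pos (by omega), Nat.add_sub_cancel]
      ring
    · rw [if_neg (by omega), ← List.getD_eq_getElem?_getD, hFset i]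
      congr 1
      by_cases h1 : off ≤ i ∧ i < off + m
      · rw [if_pos h1, if_pos (by omega)]
      · rw [if_neg h1, if_neg (by omega)]


theorem chebFull_eq (t1 t2 : List Int) (h : t2.length ≤ t1.length + 1) :
    chebFull t1 t2 =
      (List.range (t1.length + 1)).map
        (fun i => t1.getD i 0 * 2 -
          (if t1.length + 1 - t2.length ≤ i then t2.getD (i - (t1.length + 1 - t2.length)) 0 else 0)) := by
  simp only [chebFull]
  rw [PySem.List.foldl_append_singleton_eq_map]
  simp only [List.nil_append]
  have hdouble : (PySem.List.pyRange 0 (t1.length : Int) 1).map (fun j => PySem.List.pyGetD t1 j 0 * 2)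
      = (List.range t1.length).map (fun k => t1.getD k 0 * 2) := by
    rw [PySem.List.pyRange_zero_nat, List.map_map]
    apply List.map_congr_left
    intro k _
    simp [PySem.List.pyGetD_natCast]
  rw [hdouble]
  set R := (List.range t1.length).map (fun k => t1.getD k 0 * 2) ++ [(0:Int)] with hR
  have hRlen : R.length = t1.length + 1 := by simp [hR]
  have hRget : ∀ i : Nat, R.getD i 0 = t1.getD i 0 * 2 := by
    intro i
    by_cases h1 : i < t1.length
    · rw [hR, List.getD_append _ _ _ _ (by simpa using h1), PySem.List.getD_map_range _ _ _ _ h1]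
    · rw [List.getD_eq_getElem?_getD, hR, List.getElem?_append_right (by simpa using h1),
        List.getD_eq_default t1 _ (by omega)]
      by_cases h2 : i = t1.length
      · subst h2; simp
      · rw [List.getElem?_eq_none (by simp; omega)]
        simp
  set off := t1.length + 1 - t2.length with hoffdef
  have hoff : (R.length : Int) - (t2.length : Int) = ((off : Nat) : Int) := by
    rw [hRlen]; omega
  rw [hoff]
  apply List.ext_getElem
  · rw [subFold_len, hRlen]; simp
  · intro i h1 h2
    rw [← List.getD_eq_getElem _ 0 h1, ← List.getD_eq_getElem _ 0 h2,
      subFold_getD t2 off t2.length R le_rfl (by omega) i,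
      PySem.List.getD_map_range _ _ _ _ (by rw [subFold_len, hRlen] at h1; omega), hRget i]
    congr 1
    have hi : i < t1.length + 1 := by rw [subFold_len, hRlen] at h1; omega
    by_cases hc : off ≤ i
    · rw [if_pos ⟨hc, by omega⟩, if_pos hc]
    · rw [if_neg (by omega), if_neg hc]

def frow : Nat → List Int
  | 0 => [1]
  | 1 => [1, 0]
  | n + 2 => chebFull (frow (n + 1)) (frow n)

theorem frow_eq : ∀ n, frow n =
    (List.range (n + 1)).map (fun j => if j % 2 = 0 then (crow n).getD (j / 2) 0 else 0) := by
  intro n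
  induction n using Nat.strong_induction_on with
  | _ n ih =>
    match n with
    | 0 => decide
    | 1 => decide
    | n + 2 =>
      show chebFull (frow (n + 1)) (frow n) = _
      rw [ih (n + 1) (by omega), ih n (by omega), chebFull_eq _ _ (by simp)]
      simp only [List.length_map, List.length_range]
      have hcrow : crow (n + 2) = chebCompact (crow (n + 1)) (crow n) := rfl
      rw [hcrow]
      have hoff : n + 1 + 1 + 1 - (n + 1) = 2 := by omega
      rw [hoff]
      apply List.map_congr_left
      intro i hi
      rw [List.mem_range] at hi
      have hlen1 := len_crow (n + 1)
      have hlen2 := len_crow n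
      have hT1 : ((List.range (n + 1 + 1)).map
          (fun j => if j % 2 = 0 then (crow (n + 1)).getD (j / 2) 0 else 0)).getD i 0
          = if i % 2 = 0 then (crow (n + 1)).getD (i / 2) 0 else 0 := by
        by_cases hi2 : i < n + 1 + 1
        · exact PySem.List.getD_map_range _ _ _ _ hi2
        · rw [List.getD_eq_default _ _ (by simp; omega)]
          by_cases hp : i % 2 = 0
          · rw [if_pos hp, List.getD_eq_default _ _ (by omega)]
          · rw [if_neg hp]
      have hT2 : ∀ j : Nat, ((List.range (n + 1)).map
          (fun j => if j % 2 = 0 then (crow n).getD (j / 2) 0 else 0)).getD j 0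
          = if j < n + 1 ∧ j % 2 = 0 then (crow n).getD (j / 2) 0 else 0 := by
        intro j
        by_cases hj : j < n + 1
        · rw [PySem.List.getD_map_range _ _ _ _ hj]
          by_cases hp : j % 2 = 0
          · rw [if_pos hp, if_pos ⟨hj, hp⟩]
          · rw [if_neg hp, if_neg (by tauto)]
        · rw [List.getD_eq_default _ _ (by simp; omega), if_neg (by tauto)]
      rw [hT1, hT2 (i - 2),
        chebCompact_getD (crow (n + 1)) (crow n) (crow_ne_nil _) (by omega) (i / 2)]
      by_cases hp : i % 2 = 0
      · rw [if_pos hp, if_pos hp]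
        by_cases h2i : 2 ≤ i
        · rw [if_pos h2i, if_pos (show i - 2 < n + 1 ∧ (i - 2) % 2 = 0 by omega),
            if_pos (show 1 ≤ i / 2 ∧ i / 2 ≤ (crow n).length by omega),
            show (i - 2) / 2 = i / 2 - 1 by omega]
          ring
        · rw [if_neg h2i, if_neg (show ¬(1 ≤ i / 2 ∧ i / 2 ≤ (crow n).length) by omega)]
          ring
      · rw [if_neg hp, if_neg hp]
        by_cases h2i : 2 ≤ i
        · rw [if_pos h2i, if_neg (show ¬(i - 2 < n + 1 ∧ (i - 2) % 2 = 0) by omega)]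
          ring
        · rw [if_neg h2i]
          ring

theorem A_fold : ∀ k : Nat,
    (PySem.List.pyRange 2 (2 + (k : Int)) 1).foldl
      (fun memo i =>
        memo ++ [chebFull ((PySem.List.pyGet? memo (i - 1)).getD [])
                          ((PySem.List.pyGet? memo (i - 2)).getD [])]) [[1], [1, 0]]
      = (List.range (k + 2)).map frow := by
  intro k
  induction k with
  | zero => decide
  | succ k ih =>
    rw [show (2 : Int) + ((k + 1 : Nat) : Int) = (2 + (k : Int)) + 1 by push_cast; ring,
      PySem.List.pyRange_one_succ_right (by omega), List.foldl_append]
    simp only [List.foldl_cons, List.foldl_nil]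
    rw [ih]
    have hg : ∀ m : Nat, m < k + 2 →
        (PySem.List.pyGet? ((List.range (k + 2)).map frow) ((m : Nat) : Int)).getD [] = frow m := by
      intro m hm
      rw [PySem.List.pyGet?_natCast, List.getElem?_map, List.getElem?_range hm]
      rfl
    rw [show 2 + (k : Int) - 1 = ((k + 1 : Nat) : Int) by push_cast; ring,
      show 2 + (k : Int) - 2 = ((k : Nat) : Int) by ring,
      hg (k + 1) (by omega), hg k (by omega)]
    rw [show (List.range (k + 1 + 2)) = List.range (k + 2) ++ [k + 2] from List.range_succ,
      List.map_append]
    rfl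

theorem A_eq (x : Int) (hx : 0 ≤ x) : chebyshev_iterative x = frow x.toNat := by
  by_cases hx1 : x ≤ 1
  · have : x = 0 ∨ x = 1 := by omega
    rcases this with h | h <;> subst h <;> decide
  · simp only [chebyshev_iterative, if_neg hx1]
    rw [show x + 1 = 2 + ((x.toNat - 1 : Nat) : Int) by omega,
      A_fold (x.toNat - 1),
      show x = ((x.toNat : Nat) : Int) by omega,
      PySem.List.pyGet?_natCast, List.getElem?_map, List.getElem?_range (by omega)]
    rfl

theorem B_fold (l : List Int) : ∀ m : Nat,
    l.foldl (fun (s : List Int × List Int) _ => (s.2, chebCompact s.2 s.1)) (crow m, crow (m + 1))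
      = (crow (m + l.length), crow (m + l.length + 1)) := by
  induction l with
  | nil => intro m; simp
  | cons a l ih =>
    intro m
    rw [List.foldl_cons]
    have hstep : (((crow m, crow (m + 1)) : List Int × List Int).2,
        chebCompact (crow m, crow (m + 1)).2 (crow m, crow (m + 1)).1)
        = (crow (m + 1), crow (m + 1 + 1)) := rfl
    rw [hstep, ih (m + 1)]
    simp only [List.length_cons]
    have e1 : m + 1 + l.length = m + (l.length + 1) := by omega
    rw [e1]

theorem expFold_len (p1 : List Int) : ∀ (m : Nat) (out : List Int),
    ((PySem.List.pyRange 0 (m : Int) 1).foldl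
      (fun o k => PySem.List.pySetD o (2 * k) (PySem.List.pyGetD p1 k 0)) out).length
      = out.length := by
  intro m
  induction m with
  | zero => intro out; simp
  | succ m ih =>
    intro out
    rw [show ((m + 1 : Nat) : Int) = (m : Int) + 1 by push_cast; ring,
      PySem.List.pyRange_one_succ_right (by exact_mod_cast Nat.zero_le m), List.foldl_append]
    simp only [List.foldl_cons, List.foldl_nil]
    rw [show (2 : Int) * (m : Int) = ((2 * m : Nat) : Int) by push_cast; ring,
      PySem.List.pySetD_natCast, List.length_set, ih out]

theorem expFold_getD (p1 : List Int) : ∀ (m : Nat) (out : List Int),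
    2 * m ≤ out.length + 1 → ∀ i : Nat,
    ((PySem.List.pyRange 0 (m : Int) 1).foldl
      (fun o k => PySem.List.pySetD o (2 * k) (PySem.List.pyGetD p1 k 0)) out).getD i 0
      = if i % 2 = 0 ∧ i / 2 < m then p1.getD (i / 2) 0 else out.getD i 0 := by
  intro m
  induction m with
  | zero =>
    intro out hm i
    simp only [Int.natCast_zero, PySem.List.pyRange_zero, Int.toNat_zero, List.range_zero,
      List.map_nil, List.foldl_nil]
    rw [if_neg (by omega)]
  | succ m ih =>
    intro out hm i
    rw [show ((m + 1 : Nat) : Int) = (m : Int) + 1 by push_cast; ring,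
      PySem.List.pyRange_one_succ_right (by exact_mod_cast Nat.zero_le m), List.foldl_append]
    simp only [List.foldl_cons, List.foldl_nil]
    rw [show (2 : Int) * (m : Int) = ((2 * m : Nat) : Int) by push_cast; ring,
      PySem.List.pySetD_natCast, PySem.List.pyGetD_natCast]
    have hlen := expFold_len p1 m out
    set F := (PySem.List.pyRange 0 (m : Int) 1).foldl
      (fun o k => PySem.List.pySetD o (2 * k) (PySem.List.pyGetD p1 k 0)) out with hF
    have hFget := ih out (by omega)
    rw [List.getD_eq_getElem?_getD, List.getElem?_set]
    by_cases hi : 2 * m = i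
    · rw [if_pos hi, if_pos (show 2 * m < F.length by omega), Option.getD_some,
        if_pos (show i % 2 = 0 ∧ i / 2 < m + 1 by omega),
        show i / 2 = m by omega]
    · rw [if_neg hi, ← List.getD_eq_getElem?_getD, hFget i]
      by_cases hc : i % 2 = 0 ∧ i / 2 < m
      · rw [if_pos hc, if_pos (by omega)]
      · rw [if_neg hc, if_neg (by omega)]

theorem B_eq (x : Int) (hx : 0 ≤ x) : chebyshev_iterative_alt x =
    (List.range (x.toNat + 1)).map
      (fun j => if j % 2 = 0 then (crow x.toNat).getD (j / 2) 0 else 0) := by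
  by_cases h0 : x = 0
  · subst h0; decide
  · simp only [chebyshev_iterative_alt, if_neg h0]
    have hfold := B_fold (PySem.List.pyRange 2 (x + 1) 1) 0
    have hlenr : (PySem.List.pyRange 2 (x + 1) 1).length = x.toNat - 1 := by
      rw [PySem.List.length_pyRange_one]; omega
    rw [show (([1], [1]) : List Int × List Int) = (crow 0, crow 1) from rfl, hfold, hlenr]
    simp only []
    rw [show 0 + (x.toNat - 1) + 1 = x.toNat by omega]
    have hlen1 := len_crow x.toNat
    have houtlen : (List.replicate (x + 1).toNat (0 : Int)).length = x.toNat + 1 := by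
      rw [List.length_replicate]; omega
    rw [show ((crow x.toNat).length : Int) = ((x.toNat / 2 + 1 : Nat) : Int) by rw [hlen1]]
    apply List.ext_getElem
    · rw [expFold_len, houtlen]
      simp
    · intro i h1 h2
      have h1n : i < x.toNat + 1 := by
        have h := h1
        rw [expFold_len, houtlen] at h
        exact h
      rw [← List.getD_eq_getElem _ 0 h1, ← List.getD_eq_getElem _ 0 h2,
        expFold_getD (crow x.toNat) (x.toNat / 2 + 1) _ (by rw [houtlen]; omega) i,
        PySem.List.getD_map_range _ _ _ _ (by omega)]
      have hrep : (List.replicate (x + 1).toNat (0 : Int)).getD i 0 = 0 := by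
        by_cases hir : i < (x + 1).toNat
        · exact List.getD_replicate _ hir
        · exact List.getD_eq_default _ _ (by rw [List.length_replicate]; omega)
      by_cases hp : i % 2 = 0
      · rw [if_pos (show i % 2 = 0 ∧ i / 2 < x.toNat / 2 + 1 by omega), if_pos hp]
      · rw [if_neg (by tauto), if_neg hp, hrep]

-- ===== VERDICT (by name: the statement is the Claim_ definition above) =====
theorem chebyshev_iterative_spec : Claim_equal_chebyshev_iterative := by
  intro x _ hpre
  unfold Spec_chebyshev_iterative
  rw [A_eq x hpre, B_eq x hpre, frow_eq]
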